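-- pv_equiv track=rewrite | github.com/jathurchan/divecode | Alert-Using-Key-Card-Three-or-More-Times-in-a-One-Hour-Period.py | issue_alert
-- ===== SOURCE A (Python) =====
-- def issue_alert(times):
--     n = len(times)
--     times = sorted(times)
--     for i in range(n-2):
--         counter = 1
--         while i + counter < n and times[i + counter] - times[i] <= 60:
--             counter += 1
--
--             if counter >= 3:
--                 return True
--     return False
-- ===== SOURCE B (Python) =====
-- def issue_alert(times):
--     for t in times:
--         if sum(t <= x <= t + 60 for x in times) >= 3:
--             return True
--     return False
-- ===== Notes on version B (the rewrite author's own statement) =====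
-- stated objective: alternative
-- what changed: Dropped the sort entirely: for each element t taken as a window anchor, count how many elements fall in [t, t+60] and alert when some anchor's count reaches 3 (correct because the smallest of any qualifying triple anchors a window containing all three).
import Mathlib
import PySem

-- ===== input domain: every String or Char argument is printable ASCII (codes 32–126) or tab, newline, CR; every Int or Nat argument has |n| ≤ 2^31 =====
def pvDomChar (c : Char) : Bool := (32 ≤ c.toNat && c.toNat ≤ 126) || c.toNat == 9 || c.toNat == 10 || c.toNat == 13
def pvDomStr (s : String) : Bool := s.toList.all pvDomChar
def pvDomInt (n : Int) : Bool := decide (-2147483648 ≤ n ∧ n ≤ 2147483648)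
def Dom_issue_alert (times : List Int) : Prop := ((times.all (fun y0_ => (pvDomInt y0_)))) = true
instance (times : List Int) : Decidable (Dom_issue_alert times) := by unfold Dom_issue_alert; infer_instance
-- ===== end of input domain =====

-- B drops the sort: it anchors a 60-minute window at each element and counts members inside it (alternative algorithm, similar cost).

-- ===== PORT A =====
-- the inner `while` of A, fueled (the loop returns True as soon as counter reaches 3, so it terminates)
def issueAlertWhileA (s : List Int) (n i : Int) : Int → Nat → Bool
  | _, 0 => false
  | c, f + 1 =>
    if i + c < n ∧ PySem.List.pyGetD s (i + c) 0 - PySem.List.pyGetD s i 0 ≤ 60 then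
      (if c + 1 ≥ 3 then true else issueAlertWhileA s n i (c + 1) f)
    else false

def issue_alert (times : List Int) : Bool :=
  let n : Int := PySem.List.len times
  let s := PySem.List.sorted times (fun x => x) false
  (PySem.List.pyRange 0 (n - 2) 1).any (fun i => issueAlertWhileA s n i 1 (n.toNat + 2))

-- ===== PORT B =====
def issue_alert_alt (times : List Int) : Bool :=
  times.any (fun t => decide (3 ≤ times.countP (fun x => decide (t ≤ x ∧ x ≤ t + 60))))

-- ===== PRECONDITION & SPEC =====
def Spec_issue_alert (times : List Int) (out : Bool) : Prop := out = issue_alert_alt times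
instance (times : List Int) (out : Bool) : Decidable (Spec_issue_alert times out) := by unfold Spec_issue_alert; infer_instance

-- ===== CLAIM (what is proved, stated in full; the proofs are below) =====
def Claim_equal_issue_alert : Prop := ∀ (times : List Int), Dom_issue_alert times → Spec_issue_alert times (issue_alert times)

-- ===== LEMMAS AND PROOFS =====

-- the fueled while loop with counter 1 and fuel ≥ 2 decides exactly the two neighbour checks
theorem issueAlertWhileA_eval (s : List Int) (n i : Int) (f : Nat) :
    issueAlertWhileA s n i 1 (f + 2) =
      decide ((i + 1 < n ∧ PySem.List.pyGetD s (i + 1) 0 - PySem.List.pyGetD s i 0 ≤ 60) ∧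
              (i + 2 < n ∧ PySem.List.pyGetD s (i + 2) 0 - PySem.List.pyGetD s i 0 ≤ 60)) := by
  simp only [issueAlertWhileA]
  norm_num

-- from a count of ≥ k+1 satisfiers, an index ≥ k satisfying p
theorem exists_late_index_of_countP {p : Int → Bool} (s : List Int) (k : Nat)
    (h : k + 1 ≤ s.countP p) :
    ∃ j, k ≤ j ∧ ∃ (hj : j < s.length), p s[j] = true := by
  induction s generalizing k with
  | nil => simp at h
  | cons a s ih =>
    cases k with
    | zero =>
      have : ∃ x ∈ a :: s, p x = true := by
        by_contra hc
        push Not at hc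
        have : (a :: s).countP p = 0 := List.countP_eq_zero.mpr (by
          intro x hx; simpa using hc x hx)
        omega
      obtain ⟨x, hx, hpx⟩ := this
      obtain ⟨j, hj, he⟩ := List.mem_iff_getElem.mp hx
      exact ⟨j, Nat.zero_le _, hj, he ▸ hpx⟩
    | succ m =>
      have hs : m + 1 ≤ s.countP p := by
        rw [List.countP_cons] at h; split_ifs at h <;> omega
      obtain ⟨j, hjk, hj, hpj⟩ := ih m hs
      exact ⟨j + 1, by omega, by simpa using Nat.succ_lt_succ hj, by simpa using hpj⟩

-- from a count of ≥ 3 satisfiers, two satisfying indices at distance ≥ 2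
theorem exists_spread_of_countP_three {p : Int → Bool} (s : List Int)
    (h : 3 ≤ s.countP p) :
    ∃ i j, i + 2 ≤ j ∧ ∃ (hj : j < s.length), ∃ (hi : i < s.length),
      p s[i] = true ∧ p s[j] = true := by
  induction s with
  | nil => simp at h
  | cons a s ih =>
    by_cases hpa : p a = true
    · have hs : 2 ≤ s.countP p := by
        rw [List.countP_cons, if_pos hpa] at h; omega
      obtain ⟨j, hjk, hj, hpj⟩ := exists_late_index_of_countP s 1 hs
      exact ⟨0, j + 1, by omega, by simpa using Nat.succ_lt_succ hj,
        by simp, by simpa using hpa, by simpa using hpj⟩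
    · have hs : 3 ≤ s.countP p := by
        rw [List.countP_cons, if_neg hpa] at h; omega
      obtain ⟨i, j, hij, hj, hi, hpi, hpj⟩ := ih hs
      exact ⟨i + 1, j + 1, by omega, by simpa using Nat.succ_lt_succ hj,
        by simpa using Nat.succ_lt_succ hi, by simpa using hpi, by simpa using hpj⟩

-- a consecutive triple of the sorted list within 60 yields an anchor with window-count ≥ 3
theorem countP_three_of_triple (s : List Int) (k : Nat) (hk : k + 2 < s.length)
    (hmono : ∀ u v : Nat, (huv : u ≤ v) → (hv : v < s.length) → s[u]'(by omega) ≤ s[v])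
    (hle : s[k + 2] - s[k]'(by omega) ≤ 60) :
    3 ≤ s.countP (fun x => decide (s[k]'(by omega) ≤ x ∧ x ≤ s[k]'(by omega) + 60)) := by
  set t := s[k]'(by omega) with ht
  set p : Int → Bool := fun x => decide (t ≤ x ∧ x ≤ t + 60) with hp
  have htriple : ((s.drop k).take 3) = [s[k]'(by omega), s[k+1]'(by omega), s[k+2]] := by
    apply List.ext_getElem
    · simp; omega
    · intro n h1 h2
      simp only [List.getElem_take, List.getElem_drop]
      simp at h2
      interval_cases n <;> simp
  have hsub : ((s.drop k).take 3).Sublist s :=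
    (List.take_sublist _ _).trans (List.drop_sublist _ _)
  have hcnt : ((s.drop k).take 3).countP p ≤ s.countP p := hsub.countP_le
  have h1 : s[k]'(by omega) ≤ s[k+1]'(by omega) := hmono k (k+1) (by omega) (by omega)
  have h2 : s[k+1]'(by omega) ≤ s[k+2] := hmono (k+1) (k+2) (by omega) hk
  have : ((s.drop k).take 3).countP p = 3 := by
    rw [htriple]
    simp only [List.countP_cons, List.countP_nil, hp]
    have : t ≤ s[k+1]'(by omega) ∧ s[k+1]'(by omega) ≤ t + 60 := ⟨h1, by omega⟩
    have : t ≤ s[k+2] ∧ s[k+2] ≤ t + 60 := ⟨by omega, by omega⟩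
    simp_all
  omega

-- ===== VERDICT (by name: the statement is the Claim_ definition above) =====
theorem issue_alert_spec : Claim_equal_issue_alert := by
  intro times _dom
  unfold Spec_issue_alert issue_alert issue_alert_alt
  simp only [PySem.List.len_eq]
  set s : List Int := PySem.List.sorted times (fun x => x) false with hsdef
  have hlen : s.length = times.length := PySem.List.length_sorted ..
  have hperm : s.Perm times := PySem.List.sorted_perm ..
  have hmono : ∀ u v : Nat, (huv : u ≤ v) → (hv : v < s.length) → s[u]'(by omega) ≤ s[v] := by
    intro u v huv hv
    exact PySem.List.sorted_id_getElem_mono times huv hv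
  -- A = true ↔ some consecutive triple of s spans ≤ 60
  have hA : ((PySem.List.pyRange 0 ((times.length : Int) - 2) 1).any
        (fun i => issueAlertWhileA s (times.length : Int) i 1 ((times.length : Int).toNat + 2)) = true) ↔
      ∃ (k : Nat) (h : k + 2 < s.length), s[k + 2] - s[k]'(by omega) ≤ 60 := by
    rw [List.any_eq_true]
    constructor
    · rintro ⟨i, hi, hw⟩
      rw [PySem.List.mem_pyRange_one] at hi
      rw [issueAlertWhileA_eval, decide_eq_true_iff] at hw
      obtain ⟨⟨-, -⟩, h2n, h2⟩ := hw
      have h0 : 0 ≤ i := hi.1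
      refine ⟨i.toNat, by omega, ?_⟩
      have e0 : PySem.List.pyGetD s i 0 = s[i.toNat]'(by omega) :=
        PySem.List.pyGetD_eq_getElem s 0 (by omega) (by omega)
      have e2 : PySem.List.pyGetD s (i + 2) 0 = s[i.toNat + 2]'(by omega) := by
        rw [PySem.List.pyGetD_eq_getElem s 0 (by omega) (by omega)]
        simp only [show (i + 2).toNat = i.toNat + 2 from by omega]
      rw [e0, e2] at h2
      exact h2
    · rintro ⟨k, hk, hle⟩
      refine ⟨(k : Int), ?_, ?_⟩
      · rw [PySem.List.mem_pyRange_one]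
        exact ⟨Int.natCast_nonneg k, by omega⟩
      · rw [issueAlertWhileA_eval, decide_eq_true_iff]
        have e0 : PySem.List.pyGetD s (k : Int) 0 = s[k]'(by omega) := by
          rw [PySem.List.pyGetD_eq_getElem s 0 (by omega) (by omega)]
          simp only [Int.toNat_natCast]
        have e1 : PySem.List.pyGetD s ((k : Int) + 1) 0 = s[k + 1]'(by omega) := by
          rw [PySem.List.pyGetD_eq_getElem s 0 (by omega) (by omega)]
          simp only [show ((k : Int) + 1).toNat = k + 1 from by omega]
        have e2 : PySem.List.pyGetD s ((k : Int) + 2) 0 = s[k + 2]'(by omega) := by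
          rw [PySem.List.pyGetD_eq_getElem s 0 (by omega) (by omega)]
          simp only [show ((k : Int) + 2).toNat = k + 2 from by omega]
        have hm : s[k + 1]'(by omega) ≤ s[k + 2]'(by omega) := hmono (k+1) (k+2) (by omega) hk
        rw [e0, e1, e2]
        exact ⟨⟨by omega, by omega⟩, ⟨by omega, hle⟩⟩
  rw [Bool.eq_iff_iff, hA, List.any_eq_true]
  constructor
  · rintro ⟨k, hk, hle⟩
    refine ⟨s[k]'(by omega), hperm.mem_iff.mp (List.getElem_mem (by omega)), ?_⟩
    rw [decide_eq_true_iff, ← hperm.countP_eq]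
    exact countP_three_of_triple s k hk hmono hle
  · rintro ⟨t, _ht, hcnt⟩
    rw [decide_eq_true_iff, ← hperm.countP_eq] at hcnt
    obtain ⟨i, j, hij, hj, hi, hpi, hpj⟩ := exists_spread_of_countP_three s hcnt
    rw [decide_eq_true_iff] at hpi hpj
    refine ⟨i, by omega, ?_⟩
    have : s[i + 2]'(by omega) ≤ s[j] := hmono (i+2) j hij hj
    omega
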